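-- pv_equiv track=rewrite | github.com/LACZF/bitwise | bitwise_calculator.py | auto_detect_bit_size
-- ===== SOURCE A (Python) =====
-- def auto_detect_bit_size(value):
--     """自动识别数值所需的位宽"""
--     if value == 0:
--         return 8  # 0可以用8位表示
--
--     # 计算需要的位数
--     if value < 0:
--         # 对于负数，需要额外一位表示符号
--         bits_needed = value.bit_length() + 1
--     else:
--         bits_needed = value.bit_length()
--
--     # 找到最小的标准位宽
--     standard_sizes = [8, 16, 32, 64, 128, 256, 512, 1024]
--     for size in standard_sizes:
--         if bits_needed <= size:
--             return size
--
--     # 如果超过1024位，返回1024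
--     return 1024
-- ===== SOURCE B (Python) =====
-- def auto_detect_bit_size(value):
--     """自动识别数值所需的位宽 — closed-form: round bits_needed up to a power of two in [8,1024]."""
--     if value == 0:
--         return 8
--     bits_needed = value.bit_length() + (1 if value < 0 else 0)
--     return min(1 << max(3, (bits_needed - 1).bit_length()), 1024)
-- ===== Notes on version B (the rewrite author's own statement) =====
-- stated objective: simpler
-- what changed: Replaces the scan over the 8-element standard_sizes table with a closed-form bit-manipulation: round bits_needed up to the next power of two via (bits_needed-1).bit_length(), floored at 8 and capped at 1024.
import Mathlib
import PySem

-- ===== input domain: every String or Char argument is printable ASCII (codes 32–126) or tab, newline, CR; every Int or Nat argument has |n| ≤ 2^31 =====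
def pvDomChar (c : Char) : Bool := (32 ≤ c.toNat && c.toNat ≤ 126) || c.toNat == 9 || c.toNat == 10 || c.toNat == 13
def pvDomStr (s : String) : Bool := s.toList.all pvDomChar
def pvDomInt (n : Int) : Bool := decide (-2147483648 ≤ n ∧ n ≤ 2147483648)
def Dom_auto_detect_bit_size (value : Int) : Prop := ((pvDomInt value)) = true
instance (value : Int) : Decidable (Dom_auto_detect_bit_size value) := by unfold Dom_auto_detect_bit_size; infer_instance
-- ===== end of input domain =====

-- B replaces A's scan of the standard_sizes table with a closed-form power-of-two rounding (objective: simpler).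


-- ===== PORT A =====
-- 'for size in standard_sizes: if bits_needed <= size: return size' / fall-through 'return 1024'
def pvScanSizes (bits_needed : Nat) : List Int → Int
  | [] => 1024
  | size :: rest => if (bits_needed : Int) ≤ size then size else pvScanSizes bits_needed rest

def auto_detect_bit_size (value : Int) : Int :=
  if value = 0 then 8
  else
    let bits_needed : Nat :=
      if value < 0 then PySem.Int.bitLength value + 1 else PySem.Int.bitLength value
    pvScanSizes bits_needed [8, 16, 32, 64, 128, 256, 512, 1024]

-- ===== PORT B =====
def auto_detect_bit_size_alt (value : Int) : Int :=
  if value = 0 then 8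
  else
    let bits_needed : Nat :=
      PySem.Int.bitLength value + (if value < 0 then 1 else 0)
    min ((1 <<< max 3 (PySem.Int.bitLength ((bits_needed : Int) - 1)) : Nat) : Int) 1024

-- ===== PRECONDITION & SPEC =====
def Spec_auto_detect_bit_size (value : Int) (out : Int) : Prop := out = auto_detect_bit_size_alt value
instance (value : Int) (out : Int) : Decidable (Spec_auto_detect_bit_size value out) := by unfold Spec_auto_detect_bit_size; infer_instance

-- ===== CLAIM (what is proved, stated in full; the proofs are below) =====
def Claim_equal_auto_detect_bit_size : Prop := ∀ (value : Int), Dom_auto_detect_bit_size value → Spec_auto_detect_bit_size value (auto_detect_bit_size value)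

-- ===== LEMMAS AND PROOFS =====

-- Both sides are the same function of bits_needed; check all n in [1, 33].
theorem pv_bits_eq (n : Nat) (h1 : 1 ≤ n) (h2 : n ≤ 33) :
    pvScanSizes n [8, 16, 32, 64, 128, 256, 512, 1024]
      = min ((1 <<< max 3 (PySem.Int.bitLength ((n : Int) - 1)) : Nat) : Int) 1024 := by
  interval_cases n <;> decide

-- ===== VERDICT (by name: the statement is the Claim_ definition above) =====
theorem auto_detect_bit_size_spec : Claim_equal_auto_detect_bit_size := by
  intro value hdom
  have hb : -2147483648 ≤ value ∧ value ≤ 2147483648 := by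
    simpa [Dom_auto_detect_bit_size, pvDomInt] using hdom
  unfold Spec_auto_detect_bit_size auto_detect_bit_size auto_detect_bit_size_alt
  by_cases h0 : value = 0
  · simp [h0]
  · have habs : value.natAbs ≤ 2147483648 := by omega
    have hbl1 : 1 ≤ PySem.Int.bitLength value := by
      by_contra h
      have hlt := PySem.Int.lt_two_pow_bitLength value
      have : PySem.Int.bitLength value = 0 := by omega
      rw [this] at hlt
      simp at hlt
      omega
    have hbl32 : PySem.Int.bitLength value ≤ 32 := by
      by_contra h
      have h2 := PySem.Int.two_pow_bitLength_le value h0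
      have h3 : (2 : Nat) ^ 32 ≤ 2 ^ (PySem.Int.bitLength value - 1) :=
        Nat.pow_le_pow_right (by norm_num) (by omega)
      have : (2 : Nat) ^ 32 ≤ value.natAbs := le_trans h3 h2
      norm_num at this
      omega
    simp only [if_neg h0]
    by_cases hneg : value < 0
    · simp only [if_pos hneg]
      exact pv_bits_eq _ (by omega) (by omega)
    · simp only [if_neg hneg]
      simp only [Nat.add_zero]
      exact pv_bits_eq _ hbl1 (by omega)
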